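-- pv_equiv track=rewrite | github.com/michelleduong03/Practice | CAP1/Cap1.py | count_power3_pairs
-- ===== SOURCE A (Python) =====
-- from typing import List
--
-- def count_power3_pairs(nums: List[int]) -> int:
--     # Precompute powers of 3 up to the maximum possible sum
--     powers_of_3 = []
--     p = 1
--     max_sum = 2 * 10**5  # max nums[i] is 10^5
--     while p <= max_sum:
--         powers_of_3.append(p)
--         p *= 3
--
--     seen = {}  # dictionary to store counts of numbers
--     count = 0
--
--     for num in nums:
--         for power in powers_of_3:
--             target = power - num
--             if target in seen:
--                 count += seen[target]  # add all previous occurrences of target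
--         # update dictionary
--         if num in seen:
--             seen[num] += 1
--         else:
--             seen[num] = 1
--
--     return count
-- ===== SOURCE B (Python) =====
-- from typing import List
-- from collections import Counter
--
-- def count_power3_pairs(nums: List[int]) -> int:
--     # same power-of-3 range as the reference: powers up to 2*10**5
--     powers_of_3 = []
--     p = 1
--     max_sum = 2 * 10**5
--     while p <= max_sum:
--         powers_of_3.append(p)
--         p *= 3
--
--     cnt = Counter(nums)
--     ordered = 0       # ordered pairs (i, j), i may equal j, nums[i]+nums[j] a power of 3
--     self_pairs = 0    # indices i with nums[i]+nums[i] a power of 3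
--     for v, c in cnt.items():
--         for p in powers_of_3:
--             ordered += c * cnt[p - v]
--         if 2 * v in powers_of_3:
--             self_pairs += c
--     # each unordered pair i < j is counted twice in `ordered`
--     return (ordered - self_pairs) // 2
-- ===== Notes on version B (the rewrite author's own statement) =====
-- stated objective: alternative
-- what changed: B replaces A's running prefix-dictionary count (for each element, add the occurrences of power-target seen so far) by building one Counter of the whole list, summing cnt[v]*cnt[power-v] over the distinct values and all powers, subtracting the self-pair indices, and halving the symmetric double count.
import Mathlib
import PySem

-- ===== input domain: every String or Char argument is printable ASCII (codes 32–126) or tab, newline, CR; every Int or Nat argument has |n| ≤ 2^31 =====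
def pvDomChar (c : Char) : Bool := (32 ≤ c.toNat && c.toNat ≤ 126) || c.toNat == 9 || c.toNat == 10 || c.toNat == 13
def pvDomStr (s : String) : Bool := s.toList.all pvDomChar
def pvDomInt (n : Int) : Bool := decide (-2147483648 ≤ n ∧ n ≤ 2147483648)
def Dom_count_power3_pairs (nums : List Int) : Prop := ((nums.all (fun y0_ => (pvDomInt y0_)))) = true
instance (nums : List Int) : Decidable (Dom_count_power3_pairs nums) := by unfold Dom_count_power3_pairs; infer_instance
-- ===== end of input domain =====

-- B builds a full Counter once and halves a symmetric double count instead of A's running prefix dictionary; objective: alternative (same asymptotic cost).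

-- ===== PORT A =====
-- the 'while p <= max_sum: append; p *= 3' loop of both Pythons; the fuel 13 only makes
-- the recursion structural (12 iterations happen: 3^11 ≤ 2*10^5 < 3^12)
def powers3Aux : Nat → Int → List Int
  | 0, _ => []
  | fuel + 1, p => if p ≤ 200000 then p :: powers3Aux fuel (p * 3) else []

def powersOf3 : List Int := powers3Aux 13 1

def count_power3_pairs (nums : List Int) : Int :=
  -- for num in nums: (for power: if target in seen: count += seen[target]); then update seen
  (nums.foldl
    (fun (s : PySem.Dict Int Int × Int) num =>
      let count := powersOf3.foldl
        (fun c power =>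
          if s.1.contains (power - num) then c + s.1.getD (power - num) 0 else c) s.2
      let seen := if s.1.contains num then s.1.insert num (s.1.getD num 0 + 1)
                  else s.1.insert num 1
      (seen, count))
    (PySem.Dict.empty, 0)).2

-- ===== PORT B =====
def count_power3_pairs_alt (nums : List Int) : Int :=
  let cnt := PySem.Dict.counter nums
  -- for v, c in cnt.items(): ordered += c * cnt[p - v] over powers; self_pairs += c if 2*v is a power
  let s := cnt.items.foldl
    (fun (s : Int × Int) vc =>
      (powersOf3.foldl (fun o p => o + vc.2 * cnt.getD (p - vc.1) 0) s.1,
       if (2 * vc.1) ∈ powersOf3 then s.2 + vc.2 else s.2))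
    (0, 0)
  PySem.Int.floordiv (s.1 - s.2) 2

-- ===== PRECONDITION & SPEC =====
def Spec_count_power3_pairs (nums : List Int) (out : Int) : Prop := out = count_power3_pairs_alt nums
instance (nums : List Int) (out : Int) : Decidable (Spec_count_power3_pairs nums out) := by unfold Spec_count_power3_pairs; infer_instance

-- ===== CLAIM (what is proved, stated in full; the proofs are below) =====
def Claim_equal_count_power3_pairs : Prop := ∀ (nums : List Int), Dom_count_power3_pairs nums → Spec_count_power3_pairs nums (count_power3_pairs nums)

-- ===== LEMMAS AND PROOFS =====

theorem powersOf3_nodup : powersOf3.Nodup := by decide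

-- pc l = number of unordered index pairs i < j with nums[i]+nums[j] in powersOf3 (head-with-tail recursion)
def pc : List Int → Int
  | [] => 0
  | x :: t => (t.countP (fun y => decide ((x + y) ∈ powersOf3)) : Int) + pc t

-- pcnt pre l = pairs of each element of l with its growing prefix (A's counting order)
def pcnt : List Int → List Int → Int
  | _, [] => 0
  | pre, x :: t => (pre.countP (fun y => decide ((x + y) ∈ powersOf3)) : Int) + pcnt (pre ++ [x]) t

-- indicator sum over a Nodup list
theorem sum_ite_eq_mem (L : List Int) (h : L.Nodup) (s : Int) :
    (L.map (fun p => if p = s then (1 : Int) else 0)).sum = if s ∈ L then 1 else 0 := by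
  induction L with
  | nil => simp
  | cons a L ih =>
    simp only [List.nodup_cons] at h
    by_cases hs : a = s
    · subst hs
      simp [ih h.2, h.1]
    · simp [hs, ih h.2, Ne.symm hs]

-- Σ_{p ∈ powersOf3} l.count (p - x) = number of y in l with x + y a power of 3
theorem sum_count_sub (l : List Int) (x : Int) :
    (powersOf3.map (fun p => (l.count (p - x) : Int))).sum
      = (l.countP (fun y => decide ((x + y) ∈ powersOf3)) : Int) := by
  induction l with
  | nil => simp
  | cons y t ih =>
    have hmap : (powersOf3.map (fun p => ((y :: t).count (p - x) : Int)))
        = powersOf3.map (fun p => (t.count (p - x) : Int)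
            + (if p = x + y then (1 : Int) else 0)) := by
      apply List.map_congr_left
      intro p _
      rw [List.count_cons]
      by_cases hp : p = x + y
      · simp [hp]
      · have h2 : ¬ (y = p - x) := by omega
        simp [hp, h2]
    rw [hmap, PySem.List.sum_map_add_int, ih,
        sum_ite_eq_mem _ powersOf3_nodup, List.countP_cons]
    by_cases hy : (x + y) ∈ powersOf3
    · simp [hy]
    · simp [hy]

-- split a mapped sum at one value
theorem sum_split (N : List Int) (v : Int) (f : Int → Int) :
    (N.map f).sum
      = (N.count v : Int) * f v + ((N.filter (fun x => x ≠ v)).map f).sum := by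
  induction N with
  | nil => simp
  | cons x t ih =>
    rcases eq_or_ne x v with hx | hx
    · subst hx
      have hfil : List.filter (fun y => decide (y ≠ x)) (x :: t)
          = List.filter (fun y => decide (y ≠ x)) t := by simp
      rw [List.map_cons, List.sum_cons, ih, hfil, List.count_cons_self]
      push_cast
      ring
    · have hfil : List.filter (fun y => decide (y ≠ v)) (x :: t)
          = x :: List.filter (fun y => decide (y ≠ v)) t := by simp [hx]
      rw [hfil, List.map_cons, List.sum_cons, List.map_cons, List.sum_cons, ih]
      rw [List.count_cons_of_ne hx]
      ring

-- grouped sum: Σ over distinct values of count·f = Σ over the list of f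
theorem grouped_sum (D : List Int) (N : List Int) (f : Int → Int)
    (hnd : D.Nodup) (hcov : ∀ x ∈ N, x ∈ D) :
    (D.map (fun v => (N.count v : Int) * f v)).sum = (N.map f).sum := by
  induction D generalizing N with
  | nil =>
    have : N = [] := List.eq_nil_iff_forall_not_mem.mpr (fun x hx => by simpa using hcov x hx)
    simp [this]
  | cons v D ih =>
    simp only [List.nodup_cons] at hnd
    rw [sum_split N v f]
    have hcong : D.map (fun u => (N.count u : Int) * f u)
        = D.map (fun u => ((N.filter (fun x => x ≠ v)).count u : Int) * f u) := by
      apply List.map_congr_left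
      intro u hu
      have huv : u ≠ v := fun h => hnd.1 (h ▸ hu)
      rw [List.count_filter (by simp [huv])]
    rw [List.map_cons, List.sum_cons, hcong,
        ih _ hnd.2 (fun x hx => by
          have hxN : x ∈ N := List.mem_of_mem_filter hx
          have hxv : x ≠ v := by simpa using List.of_mem_filter hx
          have hm := List.mem_cons.mp (hcov x hxN)
          tauto)]

-- symmetric double count identity
theorem double_count (l : List Int) :
    (l.map (fun x => (l.countP (fun y => decide ((x + y) ∈ powersOf3)) : Int))).sum
      = 2 * pc l + (l.countP (fun x => decide ((2 * x) ∈ powersOf3)) : Int) := by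
  induction l with
  | nil => simp [pc]
  | cons x t ih =>
    have hmap : t.map (fun z => ((x :: t).countP (fun y => decide ((z + y) ∈ powersOf3)) : Int))
        = t.map (fun z => (t.countP (fun y => decide ((z + y) ∈ powersOf3)) : Int)
            + (if decide ((x + z) ∈ powersOf3) = true then (1 : Int) else 0)) := by
      apply List.map_congr_left
      intro z _
      rw [List.countP_cons]
      by_cases hz : (z + x) ∈ powersOf3
      · have hz' : (x + z) ∈ powersOf3 := by rwa [add_comm]
        simp [hz, hz']
      · have hz' : ¬ (x + z) ∈ powersOf3 := by rwa [add_comm]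
        simp [hz, hz']
    have hcomm : t.countP (fun z => decide ((x + z) ∈ powersOf3))
        = t.countP (fun y => decide ((x + y) ∈ powersOf3)) := rfl
    rw [List.map_cons, List.sum_cons, hmap, PySem.List.sum_map_add_int, ih,
        PySem.List.sum_map_ite_one_zero, List.countP_cons, List.countP_cons]
    simp only [pc]
    by_cases hx : (2 * x) ∈ powersOf3
    · have hx' : (x + x) ∈ powersOf3 := by rwa [two_mul] at hx
      simp [hx, hx']
      ring
    · have hx' : ¬ (x + x) ∈ powersOf3 := by rwa [two_mul] at hx
      simp [hx, hx']
      ring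

-- A's loop invariant: with seen = counter of the prefix `pre`, the loop adds pcnt pre l
theorem A_loop (l : List Int) (d : PySem.Dict Int Int) (c : Int) (pre : List Int)
    (h : ∀ v, d.getD v 0 = (pre.count v : Int)) :
    (l.foldl
      (fun (s : PySem.Dict Int Int × Int) num =>
        let count := powersOf3.foldl
          (fun c power =>
            if s.1.contains (power - num) then c + s.1.getD (power - num) 0 else c) s.2
        let seen := if s.1.contains num then s.1.insert num (s.1.getD num 0 + 1)
                    else s.1.insert num 1
        (seen, count))
      (d, c)).2 = c + pcnt pre l := by
  induction l generalizing d c pre with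
  | nil => simp [pcnt]
  | cons num t ih =>
    simp only [List.foldl_cons]
    have hinner : powersOf3.foldl
        (fun c power =>
          if d.contains (power - num) then c + d.getD (power - num) 0 else c) c
        = c + (pre.countP (fun y => decide ((num + y) ∈ powersOf3)) : Int) := by
      rw [PySem.List.foldl_congr_mem _ _
            (fun c power => c + (pre.count (power - num) : Int)) _
            (fun acc p _ => by
              by_cases hc : d.contains (p - num)
              · rw [if_pos hc, h]
              · rw [if_neg (by simpa using hc)]
                have h0 : d.getD (p - num) 0 = 0 :=
                  PySem.Dict.getD_of_not_contains d 0 (by simpa using hc)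
                have hcount := h (p - num)
                rw [h0] at hcount
                show acc = acc + (List.count (p - num) pre : Int)
                omega),
          PySem.List.foldl_add, sum_count_sub]
    have hseen : ∀ v, (if d.contains num then d.insert num (d.getD num 0 + 1)
                    else d.insert num 1).getD v 0 = ((pre ++ [num]).count v : Int) := by
      intro v
      have hc : (pre ++ [num]).count v = pre.count v + if v = num then 1 else 0 := by
        rw [List.count_append, List.count_singleton]
        by_cases hv : v = num
        · simp [hv]
        · simp [hv, Ne.symm hv]
      by_cases hd : d.contains num
      · rw [if_pos hd, PySem.Dict.getD_insert, h, hc]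
        by_cases hv : v = num
        · simp [hv]
        · simp only [if_neg hv]
          push_cast
          simpa using h v
      · have h0 : (pre.count num : Int) = 0 := by
          have := PySem.Dict.getD_of_not_contains d (k := num) 0 (by simpa using hd)
          rw [← h num, this]
        rw [if_neg (by simpa using hd), PySem.Dict.getD_insert, hc]
        by_cases hv : v = num
        · subst hv
          rw [if_pos rfl]
          push_cast
          omega
        · simp only [if_neg hv]
          push_cast
          simpa using h v
    rw [show (fun (s : PySem.Dict Int Int × Int) num =>
        ((if s.1.contains num then s.1.insert num (s.1.getD num 0 + 1)
          else s.1.insert num 1),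
         powersOf3.foldl
          (fun c power =>
            if s.1.contains (power - num) then c + s.1.getD (power - num) 0 else c) s.2))
        = (fun (s : PySem.Dict Int Int × Int) num =>
        ((if s.1.contains num then s.1.insert num (s.1.getD num 0 + 1)
          else s.1.insert num 1),
         powersOf3.foldl
          (fun c power =>
            if s.1.contains (power - num) then c + s.1.getD (power - num) 0 else c) s.2)) from rfl]
    rw [ih _ _ (pre ++ [num]) hseen]
    simp only [pcnt, hinner]
    ring

-- A's prefix counting equals the head-with-tail count
theorem pcnt_general (l pre : List Int) :
    pcnt pre l
      = (l.map (fun x => (pre.countP (fun y => decide ((x + y) ∈ powersOf3)) : Int))).sum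
        + pc l := by
  induction l generalizing pre with
  | nil => simp [pcnt, pc]
  | cons x t ih =>
    simp only [pcnt, pc, ih (pre ++ [x]), List.map_cons, List.sum_cons]
    have hmap : t.map (fun z => ((pre ++ [x]).countP (fun y => decide ((z + y) ∈ powersOf3)) : Int))
        = t.map (fun z => (pre.countP (fun y => decide ((z + y) ∈ powersOf3)) : Int)
            + (if decide ((x + z) ∈ powersOf3) = true then (1 : Int) else 0)) := by
      apply List.map_congr_left
      intro z _
      rw [List.countP_append]
      by_cases hz : (z + x) ∈ powersOf3
      · have hz' : (x + z) ∈ powersOf3 := by rwa [add_comm]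
        simp [hz, hz']
      · have hz' : ¬ (x + z) ∈ powersOf3 := by rwa [add_comm]
        simp [hz, hz']
    rw [hmap, PySem.List.sum_map_add_int, PySem.List.sum_map_ite_one_zero]
    ring

theorem pcnt_nil_eq_pc (l : List Int) : pcnt [] l = pc l := by
  rw [pcnt_general]
  simp

-- B's two accumulators: the symmetric double count and the self-pair correction
theorem B_eq_pc (nums : List Int) : count_power3_pairs_alt nums = pc nums := by
  have hcov : ∀ x ∈ nums, x ∈ PySem.Set.ofList nums :=
    fun x hx => (PySem.Set.mem_ofList nums x).mpr hx
  have hf : (PySem.Dict.counter nums).items.foldl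
      (fun (o : Int) (vc : Int × Int) =>
        powersOf3.foldl (fun o p => o + vc.2 * (PySem.Dict.counter nums).getD (p - vc.1) 0) o) 0
      = 2 * pc nums + (nums.countP (fun x => decide ((2 * x) ∈ powersOf3)) : Int) := by
    rw [PySem.List.foldl_congr_mem _ _
          (fun (o : Int) (vc : Int × Int) =>
            o + vc.2 * (nums.countP (fun y => decide ((vc.1 + y) ∈ powersOf3)) : Int)) _
          (fun acc vc _ => by
            rw [PySem.List.foldl_add]
            congr 1
            have hm : powersOf3.map (fun p => vc.2 * (PySem.Dict.counter nums).getD (p - vc.1) 0)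
                = powersOf3.map (fun p => vc.2 * (nums.count (p - vc.1) : Int)) := by
              apply List.map_congr_left
              intro p _
              rw [PySem.Dict.getD_counter]
            rw [hm, List.sum_map_mul_left, sum_count_sub]),
        PySem.List.foldl_add, PySem.Dict.items_counter, List.map_map]
    have hcomp : ((fun (vc : Int × Int) =>
            vc.2 * (nums.countP (fun y => decide ((vc.1 + y) ∈ powersOf3)) : Int))
          ∘ (fun k => (k, (nums.count k : Int))))
        = fun v => (nums.count v : Int)
            * (nums.countP (fun y => decide ((v + y) ∈ powersOf3)) : Int) := rfl
    rw [hcomp, grouped_sum _ _ _ (PySem.Set.nodup_ofList nums) hcov, double_count]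
    ring
  have hg : (PySem.Dict.counter nums).items.foldl
      (fun (sp : Int) (vc : Int × Int) =>
        if (2 * vc.1) ∈ powersOf3 then sp + vc.2 else sp) 0
      = (nums.countP (fun x => decide ((2 * x) ∈ powersOf3)) : Int) := by
    rw [PySem.Dict.items_counter, List.foldl_map,
        PySem.List.foldl_congr_mem _ _
          (fun (sp : Int) (v : Int) =>
            sp + (nums.count v : Int) * (if (2 * v) ∈ powersOf3 then (1 : Int) else 0)) _
          (fun acc v _ => by
            by_cases hv : (2 * v) ∈ powersOf3
            · simp [hv]
            · simp [hv]),
        PySem.List.foldl_add,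
        grouped_sum _ _ _ (PySem.Set.nodup_ofList nums) hcov]
    have hm : nums.map (fun v => if (2 * v) ∈ powersOf3 then (1 : Int) else 0)
        = nums.map (fun v => if (fun x => decide ((2 * x) ∈ powersOf3)) v = true then (1 : Int) else 0) := by
      apply List.map_congr_left
      intro v _
      by_cases hv : (2 * v) ∈ powersOf3
      · simp [hv]
      · simp [hv]
    rw [hm, PySem.List.sum_map_ite_one_zero]
    ring
  simp only [count_power3_pairs_alt]
  rw [PySem.List.foldl_prod_mk
        (f := fun (o : Int) (vc : Int × Int) =>
          powersOf3.foldl (fun o p => o + vc.2 * (PySem.Dict.counter nums).getD (p - vc.1) 0) o)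
        (g := fun (sp : Int) (vc : Int × Int) =>
          if (2 * vc.1) ∈ powersOf3 then sp + vc.2 else sp)]
  simp only [hf, hg]
  have harith : 2 * pc nums + (nums.countP (fun x => decide ((2 * x) ∈ powersOf3)) : Int)
      - (nums.countP (fun x => decide ((2 * x) ∈ powersOf3)) : Int) = 2 * pc nums := by ring
  rw [harith, PySem.Int.floordiv_eq_ediv_of_pos (by norm_num)]
  omega

theorem A_eq_pc (nums : List Int) : count_power3_pairs nums = pc nums := by
  unfold count_power3_pairs
  rw [A_loop nums PySem.Dict.empty 0 [] (fun v => by simp), pcnt_nil_eq_pc]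
  ring

-- ===== VERDICT (by name: the statement is the Claim_ definition above) =====
theorem count_power3_pairs_spec : Claim_equal_count_power3_pairs := by
  intro nums _
  unfold Spec_count_power3_pairs
  rw [A_eq_pc, B_eq_pc]
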